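-- pv_equiv track=rewrite | github.com/andregri/pipmore | pipmore/package.py | max_release
-- ===== SOURCE A (Python) =====
-- def max_release(a, b):
--     """
--     Find the highest release between a and b.
--     """
--     splitted_a = a.split(".")
--     splitted_b = b.split(".")
--
--     for i in range(min(len(splitted_a), len(splitted_b))):
--         try:
--             if int(splitted_a[i]) > int(splitted_b[i]):
--                 return a
--             if int(splitted_a[i]) < int(splitted_b[i]):
--                 return b
--         except:
--             continue
--
--     # if equals return a
--     return a
-- ===== SOURCE B (Python) =====
-- def max_release(a, b):
--     """
--     Find the highest release between a and b.
--     """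
--     pairs = []
--     for x, y in zip(a.split("."), b.split(".")):
--         try:
--             pairs.append((int(x), int(y)))
--         except ValueError:
--             continue
--     xa = tuple(p[0] for p in pairs)
--     xb = tuple(p[1] for p in pairs)
--     return a if xa >= xb else b
-- ===== Notes on version B (the rewrite author's own statement) =====
-- stated objective: alternative
-- what changed: A's interleaved parse-compare-early-return loop is replaced by a collect-then-compare decomposition: zip the split components, keep the pairs where both sides parse as ints, and return a iff the tuple of a-components is lexicographically >= the tuple of b-components.
import Mathlib
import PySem

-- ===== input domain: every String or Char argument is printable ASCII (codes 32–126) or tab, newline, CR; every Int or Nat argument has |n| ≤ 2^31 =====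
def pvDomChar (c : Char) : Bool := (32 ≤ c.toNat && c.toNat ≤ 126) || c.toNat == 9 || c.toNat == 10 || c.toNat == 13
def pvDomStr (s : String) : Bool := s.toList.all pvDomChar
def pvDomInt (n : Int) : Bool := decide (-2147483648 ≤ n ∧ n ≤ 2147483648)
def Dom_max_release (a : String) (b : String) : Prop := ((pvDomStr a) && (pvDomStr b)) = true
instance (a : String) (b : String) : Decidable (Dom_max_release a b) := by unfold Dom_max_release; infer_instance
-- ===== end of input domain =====

-- B replaces A's interleaved compare-and-early-return loop by collect-pairs-then-lexicographic-tuple-compare (objective: alternative decomposition, same cost).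

-- ===== PORT A =====
-- A's for-loop with early returns: recursion over the index list of range(min(len,len));
-- the try block's 'skip when either int() raises' is the wildcard match arm.
def pvALoop (a : String) (b : String) (sa : List String) (sb : List String) : List Int → String
  | [] => a
  | i :: rest =>
    match PySem.Int.ofStr? (PySem.List.pyGetD sa i ""), PySem.Int.ofStr? (PySem.List.pyGetD sb i "") with
    | some x, some y =>
      if x > y then a
      else if x < y then b
      else pvALoop a b sa sb rest
    | _, _ => pvALoop a b sa sb rest

def max_release (a : String) (b : String) : String :=
  let splitted_a := (PySem.Str.split? a ".").getD []
  let splitted_b := (PySem.Str.split? b ".").getD []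
  pvALoop a b splitted_a splitted_b
    (PySem.List.pyRange 0 (min (PySem.List.len splitted_a) (PySem.List.len splitted_b)) 1)

-- ===== PORT B =====
-- collect (int(x), int(y)) for the component pairs where both parse
def pvPairs (l : List (String × String)) : List (Int × Int) :=
  l.filterMap (fun p =>
    match PySem.Int.ofStr? p.1, PySem.Int.ofStr? p.2 with
    | some u, some v => some (u, v)
    | _, _ => none)

-- Python's >= on int tuples (lexicographic; shorter strict prefix is smaller)
def pvTupleGe : List Int → List Int → Bool
  | [], [] => true
  | [], _ :: _ => false
  | _ :: _, [] => true
  | x :: xs, y :: ys => if x > y then true else if x < y then false else pvTupleGe xs ys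

def max_release_alt (a : String) (b : String) : String :=
  let pairs := pvPairs (((PySem.Str.split? a ".").getD []).zip ((PySem.Str.split? b ".").getD []))
  let xa := pairs.map Prod.fst
  let xb := pairs.map Prod.snd
  if pvTupleGe xa xb then a else b

-- ===== PRECONDITION & SPEC =====
def Spec_max_release (a : String) (b : String) (out : String) : Prop := out = max_release_alt a b
instance (a : String) (b : String) (out : String) : Decidable (Spec_max_release a b out) := by unfold Spec_max_release; infer_instance

-- ===== CLAIM (what is proved, stated in full; the proofs are below) =====
def Claim_equal_max_release : Prop := ∀ (a : String) (b : String), Dom_max_release a b → Spec_max_release a b (max_release a b)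

-- ===== LEMMAS AND PROOFS =====

-- shifting all indices by one steps both lists down one cell
theorem pvALoop_shift (a b : String) (x y : String) (sa sb : List String) (is : List Nat) :
    pvALoop a b (x :: sa) (y :: sb) (is.map (fun k : Nat => ((k + 1 : Nat) : Int))) =
    pvALoop a b sa sb (is.map (fun k : Nat => (k : Int))) := by
  induction is with
  | nil => rfl
  | cons k ks ih =>
    simp only [List.map_cons, pvALoop]
    simp only [PySem.List.pyGetD_natCast, List.getD_cons_succ]
    rcases PySem.Int.ofStr? (sa.getD k "") <;> rcases PySem.Int.ofStr? (sb.getD k "") <;>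
      (push_cast at ih; simp [ih])

-- the engine: A's indexed loop over range(min) = B's collect-then-compare
theorem pvALoop_eq (a b : String) : ∀ (sa sb : List String),
    pvALoop a b sa sb (PySem.List.pyRange 0 (min (PySem.List.len sa) (PySem.List.len sb)) 1) =
    (if pvTupleGe ((pvPairs (sa.zip sb)).map Prod.fst) ((pvPairs (sa.zip sb)).map Prod.snd)
       then a else b) := by
  intro sa
  induction sa with
  | nil => intro sb; simp [PySem.List.len, PySem.List.pyRange_one_eq_nil, pvALoop, pvPairs, pvTupleGe]
  | cons x sa ih =>
    intro sb
    cases sb with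
    | nil => simp [PySem.List.len, PySem.List.pyRange_one_eq_nil, pvALoop, pvPairs, pvTupleGe]
    | cons y sb =>
      have hmin : min (PySem.List.len (x :: sa)) (PySem.List.len (y :: sb)) =
          ((min sa.length sb.length : Nat) : Int) + 1 := by
        simp only [PySem.List.len_eq, List.length_cons]
        push_cast
        omega
      rw [hmin, PySem.List.pyRange_one_cons (by positivity)]
      have hrange : PySem.List.pyRange (0 + 1) (((min sa.length sb.length : Nat) : Int) + 1) 1 =
          (List.range (min sa.length sb.length)).map (fun k : Nat => ((k + 1 : Nat) : Int)) := by
        rw [PySem.List.pyRange_one]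
        have h1 : (((min sa.length sb.length : Nat) : Int) + 1 - (0 + 1)).toNat =
            min sa.length sb.length := by omega
        rw [h1]
        apply List.map_congr_left
        intro k _
        push_cast
        ring
      have hrange0 : PySem.List.pyRange 0 (min (PySem.List.len sa) (PySem.List.len sb)) 1 =
          (List.range (min sa.length sb.length)).map (fun k : Nat => (k : Int)) := by
        rw [PySem.List.pyRange_one]
        have h0 : (min (PySem.List.len sa) (PySem.List.len sb) - 0).toNat =
            min sa.length sb.length := by
          simp only [PySem.List.len_eq]; omega
        rw [h0]
        apply List.map_congr_left
        intro k _
        ring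
      have htail : pvALoop a b (x :: sa) (y :: sb)
          (PySem.List.pyRange (0 + 1) (((min sa.length sb.length : Nat) : Int) + 1) 1) =
          pvALoop a b sa sb (PySem.List.pyRange 0 (min (PySem.List.len sa) (PySem.List.len sb)) 1) := by
        rw [hrange, hrange0, pvALoop_shift]
      have hz : (x :: sa).zip (y :: sb) = (x, y) :: sa.zip sb := rfl
      cases hx : PySem.Int.ofStr? x with
      | none =>
        simp only [pvALoop, PySem.List.pyGetD_zero_cons, hx, hz, pvPairs, List.filterMap_cons]
        rw [htail, ih sb]
        simp [pvPairs]
      | some u =>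
        cases hy : PySem.Int.ofStr? y with
        | none =>
          simp only [pvALoop, PySem.List.pyGetD_zero_cons, hx, hy, hz, pvPairs, List.filterMap_cons]
          rw [htail, ih sb]
          simp [pvPairs]
        | some v =>
          simp only [pvALoop, PySem.List.pyGetD_zero_cons, hx, hy, hz, pvPairs,
            List.filterMap_cons, List.map_cons, pvTupleGe]
          by_cases hgt : u > v
          · simp [hgt]
          · by_cases hlt : u < v
            · simp [hgt, hlt]
            · simp only [hgt, hlt, if_false]
              rw [htail, ih sb]
              simp [pvPairs]

-- ===== VERDICT (by name: the statement is the Claim_ definition above) =====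
theorem max_release_spec : Claim_equal_max_release := by
  intro a b _
  unfold Spec_max_release max_release max_release_alt
  exact (pvALoop_eq a b _ _).symm ▸ rfl
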